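-- pv_equiv track=rewrite | github.com/1615405/Algorithm_Templates_Hub | 03_DYNAMIC_PROGRAMMING/TEMPLATE_02_LINEAR.py | min_non_increasing_subsequences
-- ===== SOURCE A (Python) =====
-- def min_non_increasing_subsequences(numbers):
--     """
--     计算给定数字序列所需的最少数量的非严格递减子序列。这是一个动态规划问题，可以通过维护
--     一个列表来解决，该列表中的每个元素表示当前找到的非严格递减子序列的最小末尾元素。
--
--     参数:
--         numbers: 整数列表，表示需要处理的数字序列。
--
--     返回:
--         int: 最少可以将序列分割成的非严格递减子序列的数量。
--     """
--     from bisect import bisect_left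
--
--     tails = []  # 用于存储每个非严格递减子序列的末尾元素
--     for number in numbers:
--         # 找到可以放置当前数字的位置，保持非严格递减
--         pos = bisect_left(tails, number)
--         if pos < len(tails):
--             tails[pos] = number  # 更新这个位置的末尾元素为当前数字
--         else:
--             tails.append(number)  # 如果没有合适的位置，新增一个子序列
--
--     return len(tails)  # 返回子序列的数量
-- ===== SOURCE B (Python) =====
-- def min_non_increasing_subsequences(numbers):
--     # Classic O(n^2) LIS DP instead of patience sorting: the answer equals the
--     # length of the longest strictly increasing subsequence.
--     dp = []  # (value, length of longest strictly increasing subsequence ending at it)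
--     for x in numbers:
--         best = 0
--         for v, d in dp:
--             if v < x and d > best:
--                 best = d
--         dp.append((x, best + 1))
--     ans = 0
--     for _, d in dp:
--         if d > ans:
--             ans = d
--     return ans
-- ===== Notes on version B (the rewrite author's own statement) =====
-- stated objective: alternative
-- what changed: Replaces patience sorting (binary-search tails array) with the classic quadratic LIS dynamic program: dp[i] = 1 + max dp[j] over earlier j with numbers[j] < numbers[i], answer = max dp (0 if empty).
import Mathlib
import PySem

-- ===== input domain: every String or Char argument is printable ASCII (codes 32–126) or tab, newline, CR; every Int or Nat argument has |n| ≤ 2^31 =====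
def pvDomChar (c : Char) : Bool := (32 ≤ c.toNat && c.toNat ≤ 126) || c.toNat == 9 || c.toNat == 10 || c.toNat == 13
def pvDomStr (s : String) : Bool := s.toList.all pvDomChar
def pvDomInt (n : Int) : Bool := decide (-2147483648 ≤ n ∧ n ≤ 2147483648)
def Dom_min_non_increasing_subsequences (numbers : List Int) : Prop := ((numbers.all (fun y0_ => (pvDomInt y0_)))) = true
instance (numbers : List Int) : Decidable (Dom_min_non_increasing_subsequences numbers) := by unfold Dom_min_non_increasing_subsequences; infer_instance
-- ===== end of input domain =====

-- B replaces A's patience-sorting/binary-search algorithm by the classic quadratic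
-- LIS dynamic program (alternative algorithm, same return value; not faster).

-- ===== PORT A =====
-- bisect.bisect_left(a, x) transliterated (lo = 0, hi = len(a) at the call site;
-- every index mid probed satisfies mid < len a, so `getD mid 0` is exact for a[mid]).
def pvBisectLeft (a : List Int) (x : Int) (lo hi : Nat) : Nat :=
  if _h : lo < hi then
    let mid := (lo + hi) / 2
    if a.getD mid 0 < x then pvBisectLeft a x (mid + 1) hi
    else pvBisectLeft a x lo mid
  else lo
termination_by hi - lo
decreasing_by all_goals omega

-- one iteration of A's loop body
def pvStepA (tails : List Int) (number : Int) : List Int :=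
  let pos := pvBisectLeft tails number 0 tails.length
  if pos < tails.length then tails.set pos number else tails ++ [number]

def min_non_increasing_subsequences (numbers : List Int) : Int :=
  ((numbers.foldl pvStepA []).length : Int)

-- ===== PORT B =====
-- inner loop of Source B: best over earlier (v, d) with v < x
def pvBest (dp : List (Int × Int)) (x : Int) : Int :=
  dp.foldl (fun best vd => if vd.1 < x ∧ vd.2 > best then vd.2 else best) 0

-- one iteration of Source B's outer loop
def pvStepB (dp : List (Int × Int)) (x : Int) : List (Int × Int) :=
  dp ++ [(x, pvBest dp x + 1)]

def min_non_increasing_subsequences_alt (numbers : List Int) : Int :=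
  (numbers.foldl pvStepB []).foldl (fun ans vd => if vd.2 > ans then vd.2 else ans) 0

-- ===== PRECONDITION & SPEC =====
def Spec_min_non_increasing_subsequences (numbers : List Int) (out : Int) : Prop := out = min_non_increasing_subsequences_alt numbers
instance (numbers : List Int) (out : Int) : Decidable (Spec_min_non_increasing_subsequences numbers out) := by unfold Spec_min_non_increasing_subsequences; infer_instance

-- ===== CLAIM (what is proved, stated in full; the proofs are below) =====
def Claim_equal_min_non_increasing_subsequences : Prop := ∀ (numbers : List Int), Dom_min_non_increasing_subsequences numbers → Spec_min_non_increasing_subsequences numbers (min_non_increasing_subsequences numbers)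

-- ===== LEMMAS AND PROOFS =====

-- The loop invariant tying A's tails array to B's dp list:
-- tails is strictly increasing; dp entries are ≥ 1; a pile of index k exists iff some
-- processed element has dp-value ≥ k+1; and tails[k] is the minimum value carrying
-- dp-value ≥ k+1.
def PvInv (tails : List Int) (dp : List (Int × Int)) : Prop :=
  tails.Pairwise (· < ·) ∧
  (∀ p ∈ dp, 1 ≤ p.2) ∧
  (∀ k : Nat, k < tails.length ↔ ∃ p ∈ dp, (k : Int) + 1 ≤ p.2) ∧
  (∀ k : Nat, ∀ h : k < tails.length,
      (∃ p ∈ dp, (k : Int) + 1 ≤ p.2 ∧ p.1 = tails[k]) ∧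
      (∀ p ∈ dp, (k : Int) + 1 ≤ p.2 → tails[k] ≤ p.1))

theorem pv_sorted_mono (a : List Int) (hs : a.Pairwise (· < ·)) (i j : Nat)
    (hij : i ≤ j) (hj : j < a.length) : a.getD i 0 ≤ a.getD j 0 := by
  have hi : i < a.length := lt_of_le_of_lt hij hj
  rw [List.getD_eq_getElem a 0 hi, List.getD_eq_getElem a 0 hj]
  rcases Nat.eq_or_lt_of_le hij with rfl | hlt
  · exact le_rfl
  · exact le_of_lt ((List.pairwise_iff_getElem.mp hs) i j hi hj hlt)

theorem pvBisectLeft_spec (a : List Int) (x : Int) (lo hi : Nat)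
    (hhi : hi ≤ a.length) (hlohi : lo ≤ hi) (hs : a.Pairwise (· < ·)) :
    lo ≤ pvBisectLeft a x lo hi ∧ pvBisectLeft a x lo hi ≤ hi ∧
      (∀ k, lo ≤ k → k < pvBisectLeft a x lo hi → a.getD k 0 < x) ∧
      (∀ k, pvBisectLeft a x lo hi ≤ k → k < hi → x ≤ a.getD k 0) := by
  have main : ∀ n lo hi, hi - lo ≤ n → hi ≤ a.length → lo ≤ hi →
      lo ≤ pvBisectLeft a x lo hi ∧ pvBisectLeft a x lo hi ≤ hi ∧
      (∀ k, lo ≤ k → k < pvBisectLeft a x lo hi → a.getD k 0 < x) ∧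
      (∀ k, pvBisectLeft a x lo hi ≤ k → k < hi → x ≤ a.getD k 0) := by
    intro n
    induction n with
    | zero =>
        intro lo hi hn hhi hlh
        have heq : ¬ lo < hi := by omega
        rw [pvBisectLeft]
        simp only [heq, dite_false]
        exact ⟨le_rfl, hlh, fun k h1 h2 => absurd h2 (by omega), fun k h1 h2 => absurd h2 (by omega)⟩
    | succ n ih =>
        intro lo hi hn hhi hlh
        rw [pvBisectLeft]
        by_cases hlt : lo < hi
        · simp only [hlt, dite_true]
          by_cases hc : a.getD ((lo + hi) / 2) 0 < x
          · simp only [hc, if_true]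
            obtain ⟨h1, h2, h3, h4⟩ := ih ((lo + hi) / 2 + 1) hi (by omega) hhi (by omega)
            refine ⟨by omega, h2, ?_, h4⟩
            intro k hk1 hk2
            by_cases hkm : (lo + hi) / 2 + 1 ≤ k
            · exact h3 k hkm hk2
            · exact lt_of_le_of_lt (pv_sorted_mono a hs k ((lo + hi) / 2) (by omega) (by omega)) hc
          · simp only [hc, if_false]
            obtain ⟨h1, h2, h3, h4⟩ := ih lo ((lo + hi) / 2) (by omega) (by omega) (by omega)
            refine ⟨h1, by omega, h3, ?_⟩
            intro k hk1 hk2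
            by_cases hkm : k < (lo + hi) / 2
            · exact h4 k hk1 hkm
            · exact le_trans (not_lt.mp hc) (pv_sorted_mono a hs ((lo + hi) / 2) k (by omega) (by omega))
        · rw [dif_neg hlt]
          exact ⟨le_rfl, hlh, fun k h1 h2 => absurd h2 (by omega), fun k h1 h2 => absurd h2 (by omega)⟩
  exact main (hi - lo) lo hi le_rfl hhi hlohi

theorem pvBest_fold_spec (x : Int) (dp : List (Int × Int)) (acc : Int) :
    acc ≤ dp.foldl (fun best vd => if vd.1 < x ∧ vd.2 > best then vd.2 else best) acc ∧
    (∀ p ∈ dp, p.1 < x → p.2 ≤ dp.foldl (fun best vd => if vd.1 < x ∧ vd.2 > best then vd.2 else best) acc) ∧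
    (dp.foldl (fun best vd => if vd.1 < x ∧ vd.2 > best then vd.2 else best) acc = acc ∨
      ∃ p ∈ dp, p.1 < x ∧ p.2 = dp.foldl (fun best vd => if vd.1 < x ∧ vd.2 > best then vd.2 else best) acc) := by
  induction dp generalizing acc with
  | nil => simp
  | cons p ps ih =>
      simp only [List.foldl_cons]
      obtain ⟨h1, h2, h3⟩ := ih (if p.1 < x ∧ p.2 > acc then p.2 else acc)
      have hstep : acc ≤ (if p.1 < x ∧ p.2 > acc then p.2 else acc) := by
        split_ifs with hcond
        · exact le_of_lt hcond.2
        · exact le_rfl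
      refine ⟨le_trans hstep h1, ?_, ?_⟩
      · intro q hq hqx
        rcases List.mem_cons.mp hq with rfl | hq'
        · refine le_trans ?_ h1
          split_ifs with hcond
          · exact le_rfl
          · rw [not_and, not_lt] at hcond
            exact hcond hqx
        · exact h2 q hq' hqx
      · rcases h3 with heq | ⟨q, hq, hq1, hq2⟩
        · rw [heq]
          split_ifs with hcond
          · exact Or.inr ⟨p, List.mem_cons_self, hcond.1, rfl⟩
          · exact Or.inl rfl
        · exact Or.inr ⟨q, List.mem_cons_of_mem _ hq, hq1, hq2⟩

theorem pvMax_fold_spec (dp : List (Int × Int)) (acc : Int) :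
    acc ≤ dp.foldl (fun ans vd => if vd.2 > ans then vd.2 else ans) acc ∧
    (∀ p ∈ dp, p.2 ≤ dp.foldl (fun ans vd => if vd.2 > ans then vd.2 else ans) acc) ∧
    (dp.foldl (fun ans vd => if vd.2 > ans then vd.2 else ans) acc = acc ∨
      ∃ p ∈ dp, p.2 = dp.foldl (fun ans vd => if vd.2 > ans then vd.2 else ans) acc) := by
  induction dp generalizing acc with
  | nil => simp
  | cons p ps ih =>
      simp only [List.foldl_cons]
      obtain ⟨h1, h2, h3⟩ := ih (if p.2 > acc then p.2 else acc)
      have hstep : acc ≤ (if p.2 > acc then p.2 else acc) := by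
        split_ifs with hcond
        · exact le_of_lt hcond
        · exact le_rfl
      refine ⟨le_trans hstep h1, ?_, ?_⟩
      · intro q hq
        rcases List.mem_cons.mp hq with rfl | hq'
        · refine le_trans ?_ h1
          split_ifs with hcond
          · exact le_rfl
          · exact not_lt.mp hcond
        · exact h2 q hq'
      · rcases h3 with heq | ⟨q, hq, hq2⟩
        · rw [heq]
          split_ifs with hcond
          · exact Or.inr ⟨p, List.mem_cons_self, rfl⟩
          · exact Or.inl rfl
        · exact Or.inr ⟨q, List.mem_cons_of_mem _ hq, hq2⟩

theorem pv_step_inv (tails : List Int) (dp : List (Int × Int)) (x : Int)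
    (h : PvInv tails dp) : PvInv (pvStepA tails x) (pvStepB dp x) := by
  obtain ⟨hsort, hpos1, hiff, hmin⟩ := h
  obtain ⟨hb0, hbub, hbex⟩ := pvBest_fold_spec x dp 0
  rw [show dp.foldl (fun best vd => if vd.1 < x ∧ vd.2 > best then vd.2 else best) 0 = pvBest dp x from rfl] at hb0 hbub hbex
  obtain ⟨-, hB2, hB3, hB4⟩ :=
    pvBisectLeft_spec tails x 0 tails.length le_rfl (Nat.zero_le _) hsort
  set pos := pvBisectLeft tails x 0 tails.length with hposdef
  -- pos = best + ... : the bisect position equals B's best value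
  have hbestpos : pvBest dp x = (pos : Int) := by
    have h1 : pvBest dp x ≤ (pos : Int) := by
      rcases hbex with h0 | ⟨p, hp, hpx, hpeq⟩
      · rw [h0]; exact Int.natCast_nonneg _
      · by_contra hcon
        have hp2 : (pos : Int) + 1 ≤ p.2 := by omega
        by_cases hpL : pos < tails.length
        · have hmle := (hmin pos hpL).2 p hp hp2
          have hx := hB4 pos le_rfl hpL
          rw [List.getD_eq_getElem tails 0 hpL] at hx
          omega
        · have : tails.length < tails.length :=
            (hiff tails.length).mpr ⟨p, hp, by omega⟩
          omega
    have h2 : (pos : Int) ≤ pvBest dp x := by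
      by_cases hp0 : pos = 0
      · rw [hp0]; exact hb0
      · have hk : pos - 1 < tails.length := by omega
        have hltk := hB3 (pos - 1) (Nat.zero_le _) (by omega)
        rw [List.getD_eq_getElem tails 0 hk] at hltk
        obtain ⟨p, hp, hp2, hp1⟩ := (hmin (pos - 1) hk).1
        have := hbub p hp (by rw [hp1]; exact hltk)
        omega
    omega
  have hstepB : pvStepB dp x = dp ++ [(x, pvBest dp x + 1)] := rfl
  rw [hstepB]
  have hstepA : pvStepA tails x =
      if pos < tails.length then tails.set pos x else tails ++ [x] := by
    rw [pvStepA, ← hposdef]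
  rw [hstepA]
  by_cases hcase : pos < tails.length
  · rw [if_pos hcase]
    have hxle : x ≤ tails[pos] := by
      have := hB4 pos le_rfl hcase
      rwa [List.getD_eq_getElem tails 0 hcase] at this
    refine ⟨?_, ?_, ?_, ?_⟩
    · -- sortedness of tails.set pos x
      refine List.pairwise_iff_getElem.mpr ?_
      intro i j hi hj hij
      simp only [List.length_set] at hi hj
      rw [List.getElem_set, List.getElem_set]
      split_ifs with e1 e2
      · omega
      · have hpj : tails[pos] < tails[j] :=
          (List.pairwise_iff_getElem.mp hsort) pos j hcase hj (by omega)
        omega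
      · have := hB3 i (Nat.zero_le _) (by omega)
        rwa [List.getD_eq_getElem tails 0 hi] at this
      · exact (List.pairwise_iff_getElem.mp hsort) i j hi hj hij
    · -- dp values ≥ 1
      intro p hp
      rcases List.mem_append.mp hp with hp' | hp'
      · exact hpos1 p hp'
      · rw [List.mem_singleton.mp hp']; dsimp only; omega
    · -- length/existence iff
      intro k
      rw [List.length_set]
      constructor
      · intro hk
        obtain ⟨p, hp, hpk⟩ := (hiff k).mp hk
        exact ⟨p, List.mem_append_left _ hp, hpk⟩
      · rintro ⟨p, hp, hpk⟩
        rcases List.mem_append.mp hp with hp' | hp'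
        · exact (hiff k).mpr ⟨p, hp', hpk⟩
        · rw [List.mem_singleton.mp hp'] at hpk
          dsimp only at hpk
          omega
    · -- minimality
      intro k hk
      have hkL : k < tails.length := by
        simpa [List.length_set] using hk
      by_cases hkp : pos = k
      · subst hkp
        constructor
        · refine ⟨(x, pvBest dp x + 1), List.mem_append_right _ (List.mem_singleton_self _), ?_, ?_⟩
          · dsimp only; omega
          · dsimp only
            rw [List.getElem_set, if_pos rfl]
        · intro p hp hp2
          rw [List.getElem_set, if_pos rfl]
          rcases List.mem_append.mp hp with hp' | hp'
          · by_contra hcon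
            have := hbub p hp' (by omega)
            omega
          · rw [List.mem_singleton.mp hp']
      · constructor
        · obtain ⟨p, hp, hp2, hp1⟩ := (hmin k hkL).1
          refine ⟨p, List.mem_append_left _ hp, hp2, ?_⟩
          rw [List.getElem_set, if_neg hkp]
          exact hp1
        · intro p hp hp2
          rw [List.getElem_set, if_neg hkp]
          rcases List.mem_append.mp hp with hp' | hp'
          · exact (hmin k hkL).2 p hp' hp2
          · rw [List.mem_singleton.mp hp'] at hp2 ⊢
            dsimp only at hp2 ⊢
            have hkpos : k < pos := by omega
            have := hB3 k (Nat.zero_le _) hkpos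
            rw [List.getD_eq_getElem tails 0 hkL] at this
            exact le_of_lt this
  · rw [if_neg hcase]
    have hposL : pos = tails.length := by omega
    have hallt : ∀ i, ∀ hi : i < tails.length, tails[i] < x := by
      intro i hi
      have := hB3 i (Nat.zero_le _) (by omega)
      rwa [List.getD_eq_getElem tails 0 hi] at this
    refine ⟨?_, ?_, ?_, ?_⟩
    · -- sortedness of tails ++ [x]
      rw [List.pairwise_append]
      refine ⟨hsort, List.pairwise_singleton _ _, ?_⟩
      intro a ha b hb
      rw [List.mem_singleton.mp hb]
      obtain ⟨i, hi, rfl⟩ := List.mem_iff_getElem.mp ha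
      exact hallt i hi
    · intro p hp
      rcases List.mem_append.mp hp with hp' | hp'
      · exact hpos1 p hp'
      · rw [List.mem_singleton.mp hp']; dsimp only; omega
    · intro k
      rw [List.length_append, List.length_singleton]
      constructor
      · intro hk
        by_cases hkL : k < tails.length
        · obtain ⟨p, hp, hpk⟩ := (hiff k).mp hkL
          exact ⟨p, List.mem_append_left _ hp, hpk⟩
        · refine ⟨(x, pvBest dp x + 1), List.mem_append_right _ (List.mem_singleton_self _), ?_⟩
          dsimp only
          omega
      · rintro ⟨p, hp, hpk⟩
        rcases List.mem_append.mp hp with hp' | hp'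
        · have := (hiff k).mpr ⟨p, hp', hpk⟩
          omega
        · rw [List.mem_singleton.mp hp'] at hpk
          dsimp only at hpk
          omega
    · intro k hk
      have hkL1 : k < tails.length + 1 := by
        simpa [List.length_append] using hk
      by_cases hkL : k < tails.length
      · have hgk : (tails ++ [x])[k] = tails[k] := List.getElem_append_left hkL
        constructor
        · obtain ⟨p, hp, hp2, hp1⟩ := (hmin k hkL).1
          refine ⟨p, List.mem_append_left _ hp, hp2, ?_⟩
          rw [hgk]; exact hp1
        · intro p hp hp2
          rw [hgk]
          rcases List.mem_append.mp hp with hp' | hp'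
          · exact (hmin k hkL).2 p hp' hp2
          · rw [List.mem_singleton.mp hp']
            exact le_of_lt (hallt k hkL)
      · have hkeq : k = tails.length := by omega
        subst hkeq
        have hgk : (tails ++ [x])[tails.length] = x := by
          rw [List.getElem_append_right (le_refl tails.length)]
          simp
        constructor
        · refine ⟨(x, pvBest dp x + 1), List.mem_append_right _ (List.mem_singleton_self _), ?_, ?_⟩
          · dsimp only; omega
          · dsimp only; rw [hgk]
        · intro p hp hp2
          rw [hgk]
          rcases List.mem_append.mp hp with hp' | hp'
          · have : tails.length < tails.length := (hiff tails.length).mpr ⟨p, hp', hp2⟩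
            omega
          · rw [List.mem_singleton.mp hp']

theorem pv_fold_inv (numbers : List Int) :
    ∀ tails dp, PvInv tails dp →
      PvInv (numbers.foldl pvStepA tails) (numbers.foldl pvStepB dp) := by
  intro tails dp h
  induction numbers generalizing tails dp with
  | nil => simpa using h
  | cons y ys ih =>
      simp only [List.foldl_cons]
      exact ih _ _ (pv_step_inv tails dp y h)

theorem pv_final (tails : List Int) (dp : List (Int × Int)) (h : PvInv tails dp) :
    (tails.length : Int) = dp.foldl (fun ans vd => if vd.2 > ans then vd.2 else ans) 0 := by
  obtain ⟨-, hpos1, hiff, -⟩ := h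
  obtain ⟨h0, hub, hex⟩ := pvMax_fold_spec dp 0
  have hle1 : dp.foldl (fun ans vd => if vd.2 > ans then vd.2 else ans) 0 ≤ (tails.length : Int) := by
    rcases hex with heq | ⟨p, hp, hpeq⟩
    · rw [heq]; exact Int.natCast_nonneg _
    · have hnot : ¬ ((tails.length : Int) + 1 ≤ p.2) := by
        intro hc
        exact absurd ((hiff tails.length).mpr ⟨p, hp, hc⟩) (lt_irrefl _)
      omega
  have hle2 : (tails.length : Int) ≤ dp.foldl (fun ans vd => if vd.2 > ans then vd.2 else ans) 0 := by
    by_cases hL : tails.length = 0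
    · rw [hL]; exact h0
    · obtain ⟨p, hp, hpk⟩ := (hiff (tails.length - 1)).mp (by omega)
      have := hub p hp
      omega
  omega

-- ===== VERDICT (by name: the statement is the Claim_ definition above) =====
theorem min_non_increasing_subsequences_spec : Claim_equal_min_non_increasing_subsequences := by
  intro numbers _
  unfold Spec_min_non_increasing_subsequences min_non_increasing_subsequences min_non_increasing_subsequences_alt
  have hinv : PvInv [] ([] : List (Int × Int)) := by
    refine ⟨List.Pairwise.nil, by simp, ?_, ?_⟩
    · intro k; simp
    · intro k h; simp at h
  exact pv_final _ _ (pv_fold_inv numbers [] [] hinv)
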